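-- pv_equiv track=rewrite | github.com/MSallermann/generalized_SCME_fit | monomer/energy/fitting.py | n_coefficients
-- ===== SOURCE A (Python) =====
-- def n_coefficients(exponent_max, exponent_sum_max, skip_zero):
--     counter = 0
--     for i in range(0, exponent_max):
--         for j in range(0, exponent_max):
--             for k in range(0, exponent_max):
--                 if (i + j + k) <= exponent_sum_max:
--                     if skip_zero and (i + j + k) == 0:
--                         continue
--                     counter += 1
--     return counter
-- ===== SOURCE B (Python) =====
-- def n_coefficients(exponent_max, exponent_sum_max, skip_zero):
--     # Collapse the innermost loop: for fixed (i, j) the admissible k form a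
--     # contiguous block 0..min(exponent_max-1, exponent_sum_max-i-j), counted in O(1).
--     total = 0
--     for i in range(exponent_max):
--         for j in range(exponent_max):
--             rem = exponent_sum_max - i - j
--             if rem >= 0:
--                 total += min(exponent_max - 1, rem) + 1
--     if skip_zero and exponent_max > 0 and exponent_sum_max >= 0:
--         total -= 1
--     return total
-- ===== Notes on version B (the rewrite author's own statement) =====
-- stated objective: faster
-- what changed: The innermost k-loop is replaced by a closed-form count of the contiguous admissible k-range (min(exponent_max-1, rem)+1), and the skip_zero special case is moved out of the loops into one final subtraction.
import Mathlib
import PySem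

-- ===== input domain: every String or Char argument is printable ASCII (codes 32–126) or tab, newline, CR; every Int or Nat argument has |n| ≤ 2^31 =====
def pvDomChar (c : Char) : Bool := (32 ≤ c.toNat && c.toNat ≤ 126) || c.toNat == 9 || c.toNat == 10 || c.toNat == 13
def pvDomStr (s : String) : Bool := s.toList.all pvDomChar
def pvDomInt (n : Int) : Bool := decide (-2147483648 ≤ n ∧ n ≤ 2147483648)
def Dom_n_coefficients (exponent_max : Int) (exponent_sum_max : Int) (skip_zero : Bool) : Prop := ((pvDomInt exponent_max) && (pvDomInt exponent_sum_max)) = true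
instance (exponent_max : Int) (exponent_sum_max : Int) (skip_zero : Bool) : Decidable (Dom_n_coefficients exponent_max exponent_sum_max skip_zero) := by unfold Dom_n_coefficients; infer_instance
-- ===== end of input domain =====

-- B replaces the innermost k-loop by a closed-form count of the admissible k-range
-- and moves the skip_zero case out of the loops into one final subtraction (objective: faster).

-- ===== PORT A =====
def n_coefficients (exponent_max : Int) (exponent_sum_max : Int) (skip_zero : Bool) : Int :=
  (PySem.List.pyRange 0 exponent_max 1).foldl (fun counter i =>
    (PySem.List.pyRange 0 exponent_max 1).foldl (fun counter j =>
      (PySem.List.pyRange 0 exponent_max 1).foldl (fun counter k =>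
        if i + j + k ≤ exponent_sum_max then
          if skip_zero = true ∧ i + j + k = 0 then counter else counter + 1
        else counter) counter) counter) 0

-- ===== PORT B =====
def n_coefficients_alt (exponent_max : Int) (exponent_sum_max : Int) (skip_zero : Bool) : Int :=
  let total :=
    (PySem.List.pyRange 0 exponent_max 1).foldl (fun total i =>
      (PySem.List.pyRange 0 exponent_max 1).foldl (fun total j =>
        let rem := exponent_sum_max - i - j
        if 0 ≤ rem then total + (min (exponent_max - 1) rem + 1) else total) total) 0
  if skip_zero = true ∧ 0 < exponent_max ∧ 0 ≤ exponent_sum_max then total - 1 else total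

-- ===== PRECONDITION & SPEC =====
def Spec_n_coefficients (exponent_max : Int) (exponent_sum_max : Int) (skip_zero : Bool) (out : Int) : Prop := out = n_coefficients_alt exponent_max exponent_sum_max skip_zero
instance (exponent_max : Int) (exponent_sum_max : Int) (skip_zero : Bool) (out : Int) : Decidable (Spec_n_coefficients exponent_max exponent_sum_max skip_zero out) := by unfold Spec_n_coefficients; infer_instance

-- ===== CLAIM (what is proved, stated in full; the proofs are below) =====
def Claim_equal_n_coefficients : Prop := ∀ (exponent_max : Int) (exponent_sum_max : Int) (skip_zero : Bool), Dom_n_coefficients exponent_max exponent_sum_max skip_zero → Spec_n_coefficients exponent_max exponent_sum_max skip_zero (n_coefficients exponent_max exponent_sum_max skip_zero)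

-- ===== LEMMAS AND PROOFS =====

-- A's per-triple contribution, as a summand
def pvGA (skip_zero : Bool) (es i j k : Int) : Int :=
  if i + j + k ≤ es then (if skip_zero = true ∧ i + j + k = 0 then 0 else 1) else 0

-- B's per-pair contribution, as a summand
def pvHB (em es i j : Int) : Int :=
  if 0 ≤ es - i - j then min (em - 1) (es - i - j) + 1 else 0

lemma pv_sum_sub {a : Type} (l : List a) (f g : a → Int) :
    (l.map (fun x => f x - g x)).sum = (l.map f).sum - (l.map g).sum := by
  induction l with
  | nil => simp
  | cons x xs ih => simp [ih]; ring

-- count of k in range n with k ≤ t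
lemma pv_sum_count (n : Nat) (t : Int) (hn : 0 < n) :
    ((List.range n).map (fun (k : Nat) => if (k : Int) ≤ t then (1 : Int) else 0)).sum
      = if 0 ≤ t then min ((n : Int) - 1) t + 1 else 0 := by
  induction n with
  | zero => omega
  | succ m ih =>
    rcases Nat.eq_zero_or_pos m with hm | hm
    . subst hm; simp [List.range_succ]; split_ifs <;> omega
    . rw [List.range_succ, List.map_append, List.sum_append, ih hm]
      simp only [List.map_cons, List.map_nil, List.sum_cons, List.sum_nil]
      push_cast
      split_ifs <;> omega

-- the k = 0 indicator summed over range n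
lemma pv_sum_zero (n : Nat) :
    ((List.range n).map (fun (k : Nat) => if (k : Int) = 0 then (1 : Int) else 0)).sum
      = if 0 < n then 1 else 0 := by
  induction n with
  | zero => simp
  | succ m ih =>
    rw [List.range_succ, List.map_append, List.sum_append, ih]
    rcases Nat.eq_zero_or_pos m with hm | hm
    . subst hm; simp
    . have hm0 : ¬ ((m : Int) = 0) := by omega
      simp; omega

lemma pv_sum_zero_and (n : Nat) (C : Prop) [Decidable C] :
    ((List.range n).map (fun (k : Nat) => if (k : Int) = 0 ∧ C then (1 : Int) else 0)).sum
      = if 0 < n ∧ C then 1 else 0 := by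
  by_cases hC : C
  . simp only [hC, and_true]; exact pv_sum_zero n
  . simp [hC]

-- inner k-sum of A, for nonnegative i, j, over range n (n > 0)
lemma pv_inner (n : Nat) (hn : 0 < n) (sz : Bool) (es : Int) (i j : Int)
    (hi : 0 ≤ i) (hj : 0 ≤ j) :
    ((List.range n).map (fun (k : Nat) => pvGA sz es i j (k : Int))).sum
      = pvHB ((n : Int)) es i j
        - (if sz = true ∧ i = 0 ∧ j = 0 ∧ 0 ≤ es then 1 else 0) := by
  have hpt : (fun (k : Nat) => pvGA sz es i j (k : Int))
      = fun (k : Nat) => (if (k : Int) ≤ es - i - j then (1 : Int) else 0)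
                 - (if (k : Int) = 0 ∧ (sz = true ∧ i = 0 ∧ j = 0 ∧ 0 ≤ es) then 1 else 0) := by
    funext k
    have hk : (0 : Int) ≤ (k : Int) := by positivity
    unfold pvGA
    rcases sz with _ | _ <;> split_ifs <;> first | omega | (simp_all; omega) | simp_all
  rw [hpt, pv_sum_sub, pv_sum_count n _ hn, pv_sum_zero_and n _]
  simp only [pvHB, min_def]
  split_ifs <;> (first | omega | (simp_all; omega) | simp_all)

lemma pv_middle (n : Nat) (hn : 0 < n) (sz : Bool) (es : Int) (i : Int) (hi : 0 ≤ i) :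
    ((List.range n).map (fun (j : Nat) =>
        ((List.range n).map (fun (k : Nat) => pvGA sz es i (j : Int) (k : Int))).sum)).sum
      = ((List.range n).map (fun (j : Nat) => pvHB ((n : Int)) es i (j : Int))).sum
        - (if sz = true ∧ i = 0 ∧ 0 ≤ es then 1 else 0) := by
  have h : (fun (j : Nat) => ((List.range n).map (fun (k : Nat) => pvGA sz es i (j : Int) (k : Int))).sum)
      = fun (j : Nat) => pvHB ((n : Int)) es i (j : Int)
                 - (if (j : Int) = 0 ∧ (sz = true ∧ i = 0 ∧ 0 ≤ es) then 1 else 0) := by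
    funext j
    rw [pv_inner n hn sz es i (j : Int) hi (by positivity)]
    congr 1
    split_ifs <;> (first | omega | (simp_all; omega) | simp_all)
  rw [h, pv_sum_sub, pv_sum_zero_and n _]
  split_ifs <;> (first | omega | (simp_all; omega) | simp_all)

lemma pv_outer (n : Nat) (hn : 0 < n) (sz : Bool) (es : Int) :
    ((List.range n).map (fun (i : Nat) => ((List.range n).map (fun (j : Nat) =>
        ((List.range n).map (fun (k : Nat) => pvGA sz es (i : Int) (j : Int) (k : Int))).sum)).sum)).sum
      = ((List.range n).map (fun (i : Nat) =>
          ((List.range n).map (fun (j : Nat) => pvHB ((n : Int)) es (i : Int) (j : Int))).sum)).sum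
        - (if sz = true ∧ 0 ≤ es then 1 else 0) := by
  have h : (fun (i : Nat) => ((List.range n).map (fun (j : Nat) =>
        ((List.range n).map (fun (k : Nat) => pvGA sz es (i : Int) (j : Int) (k : Int))).sum)).sum)
      = fun (i : Nat) => ((List.range n).map (fun (j : Nat) => pvHB ((n : Int)) es (i : Int) (j : Int))).sum
                 - (if (i : Int) = 0 ∧ (sz = true ∧ 0 ≤ es) then 1 else 0) := by
    funext i
    rw [pv_middle n hn sz es (i : Int) (by positivity)]
    congr 1
    split_ifs <;> (first | omega | (simp_all; omega) | simp_all)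
  rw [h, pv_sum_sub, pv_sum_zero_and n _]
  split_ifs <;> (first | omega | (simp_all; omega) | simp_all)

-- A as a triple sum over List.range
lemma pv_A_sum (em es : Int) (sz : Bool) :
    n_coefficients em es sz
      = ((List.range em.toNat).map (fun (i : Nat) => ((List.range em.toNat).map (fun (j : Nat) =>
          ((List.range em.toNat).map (fun (k : Nat) => pvGA sz es (i : Int) (j : Int) (k : Int))).sum)).sum)).sum := by
  have e1 : ∀ (i j : Int), (fun (c : Int) (k : Nat) =>
      if i + j + (k : Int) ≤ es then (if sz = true ∧ i + j + (k : Int) = 0 then c else c + 1) else c)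
      = fun (c : Int) (k : Nat) => c + pvGA sz es i j (k : Int) := by
    intro i j
    funext c k
    unfold pvGA
    split_ifs <;> first | omega | (simp_all; omega) | simp_all
  unfold n_coefficients
  rw [PySem.List.pyRange_one]
  simp only [Int.sub_zero, zero_add, List.foldl_map, e1, PySem.List.foldl_add]

-- B's double loop as a double sum over List.range
lemma pv_B_sum (em es : Int) (sz : Bool) :
    n_coefficients_alt em es sz
      = (if sz = true ∧ 0 < em ∧ 0 ≤ es then
          ((List.range em.toNat).map (fun (i : Nat) =>
            ((List.range em.toNat).map (fun (j : Nat) => pvHB em es (i : Int) (j : Int))).sum)).sum - 1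
         else
          ((List.range em.toNat).map (fun (i : Nat) =>
            ((List.range em.toNat).map (fun (j : Nat) => pvHB em es (i : Int) (j : Int))).sum)).sum) := by
  have e1 : ∀ (i : Int), (fun (t : Int) (j : Nat) =>
      if 0 ≤ es - i - (j : Int) then t + (min (em - 1) (es - i - (j : Int)) + 1) else t)
      = fun (t : Int) (j : Nat) => t + pvHB em es i (j : Int) := by
    intro i
    funext t j
    unfold pvHB
    split_ifs <;> omega
  unfold n_coefficients_alt
  rw [PySem.List.pyRange_one]
  simp only [Int.sub_zero, zero_add, List.foldl_map, e1, PySem.List.foldl_add]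

-- ===== VERDICT (by name: the statement is the Claim_ definition above) =====
theorem n_coefficients_spec : Claim_equal_n_coefficients := by
  intro em es sz _
  unfold Spec_n_coefficients
  rw [pv_A_sum, pv_B_sum]
  rcases (by omega : em ≤ 0 ∨ 0 < em) with hle | hpos
  . have : em.toNat = 0 := by omega
    simp [this]
    intros
    omega
  . have hn : 0 < em.toNat := by omega
    have hcast : ((em.toNat : Int)) = em := by omega
    rw [pv_outer em.toNat hn sz es, hcast]
    split_ifs with h1 h2 <;> simp_all <;> omega
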